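-- pv_equiv track=rewrite | github.com/zachwhalen/AutoImagist | imagist.py | format_wheelbarrow
-- ===== SOURCE A (Python) =====
-- def format_wheelbarrow(text):
--     words = text.split(" ")
--     poem = ''
--     for i in range(len(words)):
--         if (i in [0,1,4,5,8,9,12,13,16,17]):
--             poem += words[i] + " "
--         elif (i in [2,6,10,14,18]):
--             poem += words[i] + "\n"
--         elif (i in [3,7,11,15,19]):
--             poem += words[i] + "\n\n"
--
--     return poem
-- ===== SOURCE B (Python) =====
-- def format_wheelbarrow(text):
--     # Recursive stanza templates: consume the word list four words at a time,
--     # emitting a whole "a b c\nd\n\n" stanza per step, for at most five stanzas.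
--     def go(ws, stanzas_left):
--         if stanzas_left == 0 or not ws:
--             return ''
--         if len(ws) == 1:
--             return ws[0] + ' '
--         if len(ws) == 2:
--             return ws[0] + ' ' + ws[1] + ' '
--         if len(ws) == 3:
--             return ws[0] + ' ' + ws[1] + ' ' + ws[2] + '\n'
--         a, b, c, d = ws[0], ws[1], ws[2], ws[3]
--         return a + ' ' + b + ' ' + c + '\n' + d + '\n\n' + go(ws[4:], stanzas_left - 1)
--     return go(text.split(' '), 5)
-- ===== Notes on version B (the rewrite author's own statement) =====
-- stated objective: alternative
-- what changed: Replaced the flat per-index loop that classifies every index against three hard-coded membership lists with structural recursion over the word list: a helper consumes up to four words per call, emitting a complete stanza template 'a b c\nd\n\n' (or its 1-3 word partial form) and recursing on the tail with a stanza counter capped at 5.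
import Mathlib
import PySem

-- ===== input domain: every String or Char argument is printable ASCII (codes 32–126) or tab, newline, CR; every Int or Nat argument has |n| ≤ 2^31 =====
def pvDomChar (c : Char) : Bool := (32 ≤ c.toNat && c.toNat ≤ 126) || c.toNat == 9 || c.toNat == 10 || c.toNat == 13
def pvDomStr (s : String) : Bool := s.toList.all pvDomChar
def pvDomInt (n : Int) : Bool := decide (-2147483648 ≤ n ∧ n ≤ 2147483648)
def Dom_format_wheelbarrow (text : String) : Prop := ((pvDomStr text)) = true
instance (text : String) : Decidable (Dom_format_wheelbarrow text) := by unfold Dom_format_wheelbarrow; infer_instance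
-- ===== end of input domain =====

-- B replaces A's flat per-index loop with three membership-list branches by structural
-- recursion over the word list that emits one whole stanza template per step (at most five).

-- ===== PORT A =====
-- poem += words[i] + sep : words[i] is in range for every i of range(len(words)), so pyGetD is exact here
def format_wheelbarrow (text : String) : String :=
  let words := (PySem.Str.split? text " ").getD []
  (PySem.List.pyRange 0 (words.length) 1).foldl
    (fun poem i =>
      if i ∈ ([0,1,4,5,8,9,12,13,16,17] : List Int) then
        poem ++ PySem.List.pyGetD words i "" ++ " "
      else if i ∈ ([2,6,10,14,18] : List Int) then
        poem ++ PySem.List.pyGetD words i "" ++ "\n"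
      else if i ∈ ([3,7,11,15,19] : List Int) then
        poem ++ PySem.List.pyGetD words i "" ++ "\n\n"
      else poem) ""

-- ===== PORT B =====
-- Source B's recursive helper 'go': stanza templates by length pattern, counter of stanzas left
def goB : List String → Nat → String
  | _, 0 => ""
  | [], _ + 1 => ""
  | [a], _ + 1 => a ++ " "
  | [a, b], _ + 1 => a ++ " " ++ b ++ " "
  | [a, b, c], _ + 1 => a ++ " " ++ b ++ " " ++ c ++ "\n"
  | a :: b :: c :: d :: rest, n + 1 =>
      a ++ " " ++ b ++ " " ++ c ++ "\n" ++ d ++ "\n\n" ++ goB rest n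

def format_wheelbarrow_alt (text : String) : String :=
  goB ((PySem.Str.split? text " ").getD []) 5

-- ===== PRECONDITION & SPEC =====
def Spec_format_wheelbarrow (text : String) (out : String) : Prop := out = format_wheelbarrow_alt text
instance (text : String) (out : String) : Decidable (Spec_format_wheelbarrow text out) := by unfold Spec_format_wheelbarrow; infer_instance

-- ===== CLAIM (what is proved, stated in full; the proofs are below) =====
def Claim_equal_format_wheelbarrow : Prop := ∀ (text : String), Dom_format_wheelbarrow text → Spec_format_wheelbarrow text (format_wheelbarrow text)

-- ===== LEMMAS AND PROOFS =====

-- A's loop body, as a function of the word list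
def bodyA (words : List String) (poem : String) (i : Int) : String :=
  if i ∈ ([0,1,4,5,8,9,12,13,16,17] : List Int) then
    poem ++ PySem.List.pyGetD words i "" ++ " "
  else if i ∈ ([2,6,10,14,18] : List Int) then
    poem ++ PySem.List.pyGetD words i "" ++ "\n"
  else if i ∈ ([3,7,11,15,19] : List Int) then
    poem ++ PySem.List.pyGetD words i "" ++ "\n\n"
  else poem

def Afold (ws : List String) : String :=
  (PySem.List.pyRange 0 (ws.length) 1).foldl (bodyA ws) ""

theorem portA_eq (text : String) :
    format_wheelbarrow text = Afold ((PySem.Str.split? text " ").getD []) := rfl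

theorem foldl_fixed {α : Type} (f : String → α → String) (l : List α)
    (h : ∀ a x, x ∈ l → f a x = a) : ∀ acc, l.foldl f acc = acc := by
  induction l with
  | nil => intro acc; rfl
  | cons x xs ih =>
      intro acc
      rw [List.foldl_cons, h acc x (by simp)]
      exact ih (fun a y hy => h a y (by simp [hy])) acc

theorem bodyA_high (ws : List String) (acc : String) (i : Int) (h : 20 ≤ i) :
    bodyA ws acc i = acc := by
  unfold bodyA
  rw [if_neg, if_neg, if_neg] <;> simp <;> omega

theorem pyGetD_cons_succ (x : String) (xs : List String) (i : Int) (d : String) (h : 1 ≤ i) :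
    PySem.List.pyGetD (x :: xs) i d = PySem.List.pyGetD xs (i - 1) d := by
  simp only [PySem.List.pyGetD, PySem.List.pyGet?, PySem.List.pyIdx?]
  rw [if_pos (show (0:ℤ) ≤ i by omega), if_pos (show (0:ℤ) ≤ i - 1 by omega)]
  by_cases hlt : i < (xs.length : Int) + 1
  · rw [if_pos (show i < ((x :: xs).length : Int) by simp; omega),
       if_pos (show i - 1 < (xs.length : Int) by omega)]
    obtain ⟨k, hk⟩ : ∃ k, i.toNat = k + 1 := ⟨(i - 1).toNat, by omega⟩
    simp [hk, show (i - 1).toNat = k by omega]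
  · rw [if_neg (show ¬ i < ((x :: xs).length : Int) by simp; omega),
       if_neg (show ¬ i - 1 < (xs.length : Int) by omega)]
    rfl

theorem key20 (a0 a1 a2 a3 a4 a5 a6 a7 a8 a9 a10 a11 a12 a13 a14 a15 a16 a17 a18 a19 : String) (rest : List String) :
    Afold (a0::a1::a2::a3::a4::a5::a6::a7::a8::a9::a10::a11::a12::a13::a14::a15::a16::a17::a18::a19 :: rest)
      = goB (a0::a1::a2::a3::a4::a5::a6::a7::a8::a9::a10::a11::a12::a13::a14::a15::a16::a17::a18::a19 :: rest) 5 := by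
  set ws := a0::a1::a2::a3::a4::a5::a6::a7::a8::a9::a10::a11::a12::a13::a14::a15::a16::a17::a18::a19 :: rest with hws
  have hsplit : PySem.List.pyRange 0 (ws.length) 1
      = PySem.List.pyRange 0 20 1 ++ PySem.List.pyRange 20 (ws.length) 1 :=
    PySem.List.pyRange_one_append 0 20 _ (by omega) (by simp [hws]; omega)
  unfold Afold
  rw [hsplit, List.foldl_append, foldl_fixed _ _
    (fun a x hx => bodyA_high ws a x (by
      have := (PySem.List.mem_pyRange_one.1 hx).1; omega))]
  have hr1 : PySem.List.pyRange 0 20 1 = [0,1,2,3,4,5,6,7,8,9,10,11,12,13,14,15,16,17,18,19] := by decide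
  rw [hr1]
  simp [bodyA, hws, goB, pyGetD_cons_succ, PySem.List.pyGetD_zero_cons,
    List.foldl, String.append_assoc]

set_option maxHeartbeats 1000000 in
theorem key (ws : List String) : Afold ws = goB ws 5 := by
  rcases ws with _|⟨a0, _|⟨a1, _|⟨a2, _|⟨a3, _|⟨a4, _|⟨a5, _|⟨a6, _|⟨a7, _|⟨a8, _|⟨a9, _|⟨a10, _|⟨a11, _|⟨a12, _|⟨a13, _|⟨a14, _|⟨a15, _|⟨a16, _|⟨a17, _|⟨a18, _|⟨a19, rest⟩⟩⟩⟩⟩⟩⟩⟩⟩⟩⟩⟩⟩⟩⟩⟩⟩⟩⟩⟩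
  all_goals try exact key20 a0 a1 a2 a3 a4 a5 a6 a7 a8 a9 a10 a11 a12 a13 a14 a15 a16 a17 a18 a19 rest
  all_goals
    simp [Afold, goB, bodyA, PySem.List.pyRange, PySem.List.pyGetD,
      PySem.List.pyGet?, PySem.List.pyIdx?, List.range_succ, List.foldl,
      String.append_assoc]

-- ===== VERDICT (by name: the statement is the Claim_ definition above) =====
theorem format_wheelbarrow_spec : Claim_equal_format_wheelbarrow := by
  intro text _
  unfold Spec_format_wheelbarrow
  rw [portA_eq, key]
  rfl
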